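-- pv_equiv track=rewrite | github.com/Huertas97/pyleetspeak | pyleetspeak/PunctuationCamouflage.py | make_punct_injection
-- ===== SOURCE A (Python) =====
-- def make_punct_injection(camo_text, punct_idxs, punct_symbs):
--     """Method used to inject punctuation symbols at selected positions in a given text.
--
--     This method receives the indixes and the punctuation symbols where the injection will take place.
--     These indexes must be ordered by occurrence.
--     The changes are dynamically applied to the input text.
--
--     Args:
--         camo_text (str): Input text to be punctuation camouflage
--         punct_idxs (List[int]): List of indexes in the input text sorted by occurrence where the punctuation injection should be applied.
--         punct_symbs (List[str]): List of punctuation symbols equally sorted as `punct_idxs` with the punct symbols that will be applied in each idx.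
--
--     Returns:
--         [str]: Punctuation camouflaged text
--     """
--     init_len = len(camo_text)
--     for punct_idx, punct_symb in zip(punct_idxs, punct_symbs):
--         shift_len = init_len - len(camo_text)
--         camo_text = (
--             camo_text[0 : punct_idx - shift_len]
--             + punct_symb
--             + camo_text[punct_idx - shift_len :]
--         )
--     return camo_text
-- ===== SOURCE B (Python) =====
-- def make_punct_injection(camo_text, punct_idxs, punct_symbs):
--     # Single pass: cut the original text at the (sorted) indexes and join the
--     # pieces with the symbols -- no repeated re-concatenation of the whole text.
--     pieces = []
--     prev = 0
--     for idx, symb in zip(punct_idxs, punct_symbs):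
--         pieces.append(camo_text[prev:idx])
--         pieces.append(symb)
--         prev = idx
--     pieces.append(camo_text[prev:])
--     return "".join(pieces)
-- ===== Notes on version B (the rewrite author's own statement) =====
-- stated objective: alternative
-- what changed: B replaces A's per-symbol re-slicing and re-concatenation of the whole growing text (with a cumulative shift) by a single pass that cuts the original text at the sorted indexes, collects pieces and symbols in a list and joins once.
-- outside the precondition, e.g. on make_punct_injection('ab', [1, 0], ['.', ',']): A returns 'a,.b', B returns 'a.,ab'; on make_punct_injection('abcd', [-3, -1], ['.', ',']): A returns ',a.bcd', B returns 'a.bc,d'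
import Mathlib
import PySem

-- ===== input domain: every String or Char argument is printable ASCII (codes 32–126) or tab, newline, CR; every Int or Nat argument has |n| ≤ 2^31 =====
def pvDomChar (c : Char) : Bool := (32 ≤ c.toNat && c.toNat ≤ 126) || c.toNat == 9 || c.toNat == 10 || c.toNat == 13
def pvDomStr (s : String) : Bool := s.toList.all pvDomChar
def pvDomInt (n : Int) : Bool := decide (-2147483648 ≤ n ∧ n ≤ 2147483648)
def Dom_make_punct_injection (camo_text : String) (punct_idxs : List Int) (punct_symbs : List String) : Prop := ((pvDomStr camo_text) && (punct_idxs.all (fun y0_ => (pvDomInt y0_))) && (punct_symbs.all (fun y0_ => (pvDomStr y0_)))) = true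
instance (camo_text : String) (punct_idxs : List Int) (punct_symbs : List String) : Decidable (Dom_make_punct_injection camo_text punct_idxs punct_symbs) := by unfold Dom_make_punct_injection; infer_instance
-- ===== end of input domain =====

-- B replaces A's per-symbol re-slicing and re-concatenation of the whole growing
-- text by a single pass that cuts the original text at the sorted indexes and
-- joins the pieces with the symbols once (a different algorithm; speed not
-- measured on the claimed domain).

-- ===== PORT A =====
-- the 'for punct_idx, punct_symb in zip(...)' loop of A, carrying the growing camo_text
def pvALoop (init_len : Int) (pairs : List (Int × String)) (camo : List Char) : List Char :=
  match pairs with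
  | [] => camo
  | (i, y) :: rest =>
      let shift : Int := init_len - (camo.length : Int)
      pvALoop init_len rest
        (PySem.List.slice camo (some 0) (some (i - shift)) ++ y.toList
          ++ PySem.List.slice camo (some (i - shift)) none)

def make_punct_injection (camo_text : String) (punct_idxs : List Int) (punct_symbs : List String) : String :=
  String.ofList (pvALoop (camo_text.toList.length : Int) (punct_idxs.zip punct_symbs) camo_text.toList)

-- ===== PORT B =====
-- B's loop: collect the pieces camo_text[prev:idx] and the symbols, then join
def pvBLoop (s : List Char) (pairs : List (Int × String)) (prev : Int) (pieces : List (List Char)) : List (List Char) :=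
  match pairs with
  | [] => pieces ++ [PySem.List.slice s (some prev) none]
  | (i, y) :: rest =>
      pvBLoop s rest i (pieces ++ [PySem.List.slice s (some prev) (some i), y.toList])

def make_punct_injection_alt (camo_text : String) (punct_idxs : List Int) (punct_symbs : List String) : String :=
  String.ofList (PySem.Chars.join [] (pvBLoop camo_text.toList (punct_idxs.zip punct_symbs) 0 []))

-- ===== PRECONDITION & SPEC =====
-- Pre_ excludes inputs whose USED indexes (those zipped with a symbol) are negative or
-- not sorted non-decreasingly: the docstring requires indexes 'ordered by occurrence',
-- and on unsorted/negative indexes A's cumulative-shift slice arithmetic lands the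
-- symbols at accidental positions that B's split-and-join does not reproduce.
def Pre_make_punct_injection (camo_text : String) (punct_idxs : List Int) (punct_symbs : List String) : Prop :=
  List.IsChain (· ≤ ·) ((punct_idxs.zip punct_symbs).map Prod.fst) ∧
  ∀ p ∈ punct_idxs.zip punct_symbs, 0 ≤ p.1
instance (camo_text : String) (punct_idxs : List Int) (punct_symbs : List String) : Decidable (Pre_make_punct_injection camo_text punct_idxs punct_symbs) := by unfold Pre_make_punct_injection; infer_instance

def pvWitness_make_punct_injection : String × List Int × List String := ("abc", [1, 2], [".", "!"])

def Spec_make_punct_injection (camo_text : String) (punct_idxs : List Int) (punct_symbs : List String) (out : String) : Prop := out = make_punct_injection_alt camo_text punct_idxs punct_symbs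
instance (camo_text : String) (punct_idxs : List Int) (punct_symbs : List String) (out : String) : Decidable (Spec_make_punct_injection camo_text punct_idxs punct_symbs out) := by unfold Spec_make_punct_injection; infer_instance

-- ===== CLAIM (what is proved, stated in full; the proofs are below) =====
def Claim_equal_make_punct_injection : Prop := ∀ (camo_text : String) (punct_idxs : List Int) (punct_symbs : List String), Dom_make_punct_injection camo_text punct_idxs punct_symbs → Pre_make_punct_injection camo_text punct_idxs punct_symbs → Spec_make_punct_injection camo_text punct_idxs punct_symbs (make_punct_injection camo_text punct_idxs punct_symbs)

-- ===== LEMMAS AND PROOFS =====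

lemma pv_join_nil (l : List (List Char)) : PySem.Chars.join [] l = l.flatten := by
  simp [PySem.Chars.join, List.intercalate]
  induction l with
  | nil => simp
  | cons a t ih => cases t <;> simp_all [List.intersperse]

lemma pv_drop_min (s : List Char) (a : Nat) : s.drop a = s.drop (min a s.length) := by
  by_cases h : a ≤ s.length
  · rw [min_eq_left h]
  · rw [min_eq_right (by omega), List.drop_eq_nil_of_le (le_refl _),
      List.drop_eq_nil_of_le (by omega)]

lemma pvBLoop_acc (s : List Char) :
    ∀ (pairs : List (Int × String)) (prev : Int) (pieces : List (List Char)),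
      pvBLoop s pairs prev pieces = pieces ++ pvBLoop s pairs prev [] := by
  intro pairs
  induction pairs with
  | nil => intro prev pieces; simp [pvBLoop]
  | cons hd rest ih =>
      intro prev pieces
      obtain ⟨i, y⟩ := hd
      rw [pvBLoop, pvBLoop, ih i, ih i (([] : List (List Char)) ++ _)]
      simp

lemma pvKey (s : List Char) :
    ∀ (pairs : List (Int × String)) (P : List Char) (prev : Int),
      0 ≤ prev →
      List.IsChain (· ≤ ·) (prev :: pairs.map Prod.fst) →
      (∀ p ∈ pairs, 0 ≤ p.1) →
      pvALoop (s.length : Int) pairs (P ++ s.drop (min prev.toNat s.length))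
        = P ++ (pvBLoop s pairs prev []).flatten := by
  intro pairs
  induction pairs with
  | nil =>
      intro P prev hprev _ _
      rw [pvALoop, pvBLoop]
      rw [PySem.List.slice_from s hprev, pv_drop_min]
      simp
  | cons hd rest ih =>
      intro P prev hprev hch hpos
      obtain ⟨i, y⟩ := hd
      have hi0 : (0 : Int) ≤ i := hpos (i, y) (by simp)
      have hpi : prev ≤ i := by
        have := hch.rel_head; simpa using this
      have hch' : List.IsChain (· ≤ ·) (i :: rest.map Prod.fst) := by
        have := hch.of_cons; simpa using this
      set c := min prev.toNat s.length with hc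
      have hcn : c ≤ s.length := by omega
      have hci : c ≤ i.toNat := by omega
      have hlen : ((P ++ s.drop c).length : Int) = (P.length : Int) + (s.length : Int) - (c : Int) := by
        simp only [List.length_append, List.length_drop]
        omega
      rw [pvALoop]
      have hp : i - ((s.length : Int) - ((P ++ s.drop c).length : Int)) = i + (P.length : Int) - (c : Int) := by
        rw [hlen]; ring
      rw [hp]
      have hpnn : (0 : Int) ≤ i + (P.length : Int) - (c : Int) := by omega
      have hpt : (i + (P.length : Int) - (c : Int)).toNat = P.length + (i.toNat - c) := by omega
      -- the two slices of the current text
      have hslice1 : PySem.List.slice (P ++ s.drop c) (some 0) (some (i + (P.length : Int) - (c : Int)))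
          = P ++ (s.drop c).take (i.toNat - c) := by
        rw [PySem.List.slice_zero_start, PySem.List.slice_to _ hpnn, hpt,
          List.take_length_add_append]
      have hslice2 : PySem.List.slice (P ++ s.drop c) (some (i + (P.length : Int) - (c : Int))) none
          = s.drop (min i.toNat s.length) := by
        rw [PySem.List.slice_from _ hpnn, hpt, List.drop_length_add_append, List.drop_drop,
          ← pv_drop_min]
        congr 1
        omega
      have hpiece : (s.drop c).take (i.toNat - c) = PySem.List.slice s (some prev) (some i) := by
        rw [PySem.List.slice_toNat s hprev hi0]
        by_cases h : prev.toNat ≤ s.length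
        · have hceq : c = prev.toNat := by omega
          rw [hceq]
        · have hceq : c = s.length := by omega
          rw [hceq, List.drop_eq_nil_of_le (le_refl _), List.drop_eq_nil_of_le (by omega)]
          simp
      have hIH := ih (P ++ (s.drop c).take (i.toNat - c) ++ y.toList) i hi0 hch'
        (fun p hp => hpos p (by simp [hp]))
      rw [hslice1, hslice2, hIH, pvBLoop,
        pvBLoop_acc s rest i (([] : List (List Char))
          ++ [PySem.List.slice s (some prev) (some i), y.toList])]
      simp [hpiece]

-- ===== VERDICT (by name: the statement is the Claim_ definition above) =====
theorem make_punct_injection_spec : Claim_equal_make_punct_injection := by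
  intro camo_text punct_idxs punct_symbs _ hpre
  unfold Spec_make_punct_injection make_punct_injection make_punct_injection_alt
  obtain ⟨hch, hpos⟩ := hpre
  have hch0 : List.IsChain (· ≤ ·) ((0 : Int) :: (punct_idxs.zip punct_symbs).map Prod.fst) := by
    apply List.IsChain.cons hch
    intro y hy
    have hz : y ∈ (punct_idxs.zip punct_symbs).map Prod.fst := List.mem_of_mem_head? hy
    obtain ⟨p, hp, hpz⟩ := List.mem_map.mp hz
    have := hpos p hp
    omega
  have hkey := pvKey camo_text.toList (punct_idxs.zip punct_symbs) [] 0 (le_refl 0) hch0 hpos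
  simp only [List.nil_append, Int.toNat_zero, Nat.zero_min, List.drop_zero] at hkey
  rw [pv_join_nil, hkey]
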